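-- pv_equiv track=rewrite | github.com/fingerwawa/sc-projects | stanCode_Projects/boggle_game_solver/boggle.py | illegal_input
-- ===== SOURCE A (Python) =====
-- def illegal_input(row):
-- 	if len(row) != 7:
-- 		return True
-- 	for i in range(7):
-- 		if i % 2 == 0:
-- 			if not row[i].isalpha():
-- 				return True
-- 		if i % 2 == 1:
-- 			if row[i] != " ":
-- 				return True
-- ===== SOURCE B (Python) =====
-- def illegal_input(row):
-- 	# A row is legal iff it is exactly "letter (space letter)*" of total length 7.
-- 	# Recursive grammar check consuming one "letter + space" pair per step,
-- 	# instead of A's index loop branching on i % 2.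
-- 	def ok(s):
-- 		if len(s) == 1:
-- 			return s.isalpha()
-- 		return s[0].isalpha() and s[1] == " " and ok(s[2:])
-- 	return not (len(row) == 7 and ok(row))
-- ===== Notes on version B (the rewrite author's own statement) =====
-- stated objective: simpler
-- what changed: Replaces A's index loop with parity branches by a recursive grammar check that consumes one letter-space pair of characters per step (legal = a letter followed by space-letter pairs, length 7), negated at the end.
import Mathlib
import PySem

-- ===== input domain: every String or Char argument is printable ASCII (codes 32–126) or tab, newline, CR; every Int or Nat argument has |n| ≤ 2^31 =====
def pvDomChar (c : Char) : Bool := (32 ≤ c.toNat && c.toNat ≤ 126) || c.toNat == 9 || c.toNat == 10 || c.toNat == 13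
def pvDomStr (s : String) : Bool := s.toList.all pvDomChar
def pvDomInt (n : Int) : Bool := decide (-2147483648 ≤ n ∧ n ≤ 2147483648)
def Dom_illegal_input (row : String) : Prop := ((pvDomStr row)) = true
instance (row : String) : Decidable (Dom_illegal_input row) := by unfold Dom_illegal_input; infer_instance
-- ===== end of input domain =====

-- B checks the row against the grammar "letter (space letter)*" by a recursion consuming one
-- letter+space pair per step, instead of A's index loop with parity branches; Python A returns
-- True or falls off returning None (falsy) — both ports render that fall-off as false.

-- ===== PORT A =====
-- the 'for i in range(7)' loop with its two parity branches and early returns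
def illegalLoopA (cs : List Char) : List Int → Bool
  | [] => false
  | i :: rest =>
    if PySem.Int.mod i 2 = 0 ∧ ¬ ((PySem.List.pyGet? cs i).getD ' ' |> PySem.Chars.isalpha) then true
    else if PySem.Int.mod i 2 = 1 ∧ (PySem.List.pyGet? cs i).getD ' ' ≠ ' ' then true
    else illegalLoopA cs rest

def illegal_input (row : String) : Bool :=
  if row.toList.length ≠ 7 then true
  else illegalLoopA row.toList (PySem.List.pyRange 0 7 1)

-- ===== PORT B =====
-- Source B's inner 'ok': one-char string = a letter; otherwise a letter, a space, then recurse on s[2:]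
def okB : List Char → Bool
  | [c] => PySem.Chars.isalpha c
  | c1 :: c2 :: rest => PySem.Chars.isalpha c1 && c2 == ' ' && okB rest
  | [] => false   -- unreachable under the length-7 guard (Python's s[0] would raise there)

def illegal_input_alt (row : String) : Bool :=
  !(row.toList.length == 7 && okB row.toList)

-- ===== PRECONDITION & SPEC =====
def Spec_illegal_input (row : String) (out : Bool) : Prop := out = illegal_input_alt row
instance (row : String) (out : Bool) : Decidable (Spec_illegal_input row out) := by unfold Spec_illegal_input; infer_instance

-- ===== CLAIM (what is proved, stated in full; the proofs are below) =====
def Claim_equal_illegal_input : Prop := ∀ (row : String), Dom_illegal_input row → Spec_illegal_input row (illegal_input row)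

-- ===== LEMMAS AND PROOFS =====

-- A's loop over the seven indices, on an explicit 7-character list, as one boolean disjunction
theorem loopA_eval (a b c d e f g : Char) :
    illegalLoopA [a, b, c, d, e, f, g] (PySem.List.pyRange 0 7 1) =
      (!(PySem.Chars.isalpha a) || (!(decide (b = ' ')) || (!(PySem.Chars.isalpha c)
       || (!(decide (d = ' ')) || (!(PySem.Chars.isalpha e) || (!(decide (f = ' '))
       || !(PySem.Chars.isalpha g))))))) := by
  have h0 : PySem.List.pyRange 0 7 1 = [0, 1, 2, 3, 4, 5, 6] := by decide
  rw [h0]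
  simp only [illegalLoopA]
  norm_num [PySem.Int.mod, PySem.List.pyGet?, PySem.List.pyIdx?]
  simp [show Int.fmod 1 2 = 1 by decide, show Int.fmod 3 2 = 1 by decide,
        show Int.fmod 5 2 = 1 by decide, show Int.fmod 4 2 = 0 by decide,
        show Int.fmod 6 2 = 0 by decide, show Int.toNat 2 = 2 by decide,
        show Int.toNat 3 = 3 by decide, show Int.toNat 4 = 4 by decide,
        show Int.toNat 5 = 5 by decide, show Int.toNat 6 = 6 by decide]

-- B's recursive grammar check on an explicit 7-character list
theorem okB_eval (a b c d e f g : Char) :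
    okB [a, b, c, d, e, f, g] =
      (PySem.Chars.isalpha a && (b == ' ') && (PySem.Chars.isalpha c && (d == ' ')
        && (PySem.Chars.isalpha e && (f == ' ') && PySem.Chars.isalpha g))) := by
  simp only [okB]

-- ===== VERDICT (by name: the statement is the Claim_ definition above) =====
theorem illegal_input_spec : Claim_equal_illegal_input := by
  intro row _
  unfold Spec_illegal_input illegal_input illegal_input_alt
  by_cases h : row.toList.length = 7
  · obtain ⟨a, b, c, d, e, f, g, hcs⟩ :
        ∃ a b c d e f g, row.toList = [a, b, c, d, e, f, g] := by
      match hm : row.toList, h with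
      | [a, b, c, d, e, f, g], _ => exact ⟨a, b, c, d, e, f, g, rfl⟩
    rw [hcs]
    have hne : ¬ (([a, b, c, d, e, f, g] : List Char).length ≠ 7) := by simp
    rw [if_neg hne, loopA_eval, okB_eval]
    simp only [List.length_cons, List.length_nil]
    cases PySem.Chars.isalpha a <;> cases hb : b == ' ' <;> cases PySem.Chars.isalpha c <;>
    cases hd : d == ' ' <;> cases PySem.Chars.isalpha e <;> cases hf : f == ' ' <;>
    cases PySem.Chars.isalpha g <;> simp_all
  · rw [if_pos h]
    have hl : ¬ row.length = 7 := by simpa using h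
    simp [hl]
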